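-- pv_equiv track=rewrite | github.com/soyukke/lean-unsolved | scripts/collatz_orbit_invariant_measure_mod2k.py | compute_measure_no_sink
-- ===== SOURCE A (Python) =====
-- from collections import Counter, defaultdict
--
-- def syracuse(n):
--     """Syracuse map: n odd -> (3n+1)/2^v2(3n+1)"""
--     x = 3 * n + 1
--     while x % 2 == 0:
--         x //= 2
--     return x
--
-- def collatz_orbit_odd(n, max_steps=10000):
--     """コラッツ軌道の奇数ステップを列挙"""
--     steps = []
--     x = n
--     if x % 2 == 0:
--         while x % 2 == 0:
--             x //= 2
--     seen = set()
--     for _ in range(max_steps):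
--         steps.append(x)
--         if x == 1:
--             break
--         if x in seen:
--             break
--         seen.add(x)
--         x = syracuse(x)
--     return steps
--
-- def compute_measure_no_sink(N_max, k):
--     """sinkステップ（1に留まる）を除外"""
--     mod = 2 ** k
--     freq = Counter()
--     total = 0
--
--     for n0 in range(3, N_max + 1, 2):
--         orbit = collatz_orbit_odd(n0)
--         # 最後のステップ（1）を除く
--         for x in orbit[:-1]:
--             freq[x % mod] += 1
--             total += 1
--
--     return freq, total
-- ===== SOURCE B (Python) =====
-- from collections import Counter
--
-- ORBIT_LIMIT = 10000  # examine at most this many odd iterates per seed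
--
-- def _counted(x, trail, budget, mod):
--     """Residues (mod `mod`) of the odd Collatz iterates from x that precede a
--     further step: the walk ends at 1, at a repeated value, or when the budget
--     of countable elements runs out, and the endpoint itself is not counted."""
--     if budget == 0 or x == 1 or x in trail:
--         return []
--     trail.add(x)
--     y = 3 * x + 1
--     while y % 2 == 0:
--         y //= 2
--     return [x % mod] + _counted(y, trail, budget - 1, mod)
--
-- def compute_measure_no_sink(N_max, k):
--     mod = 1 << k
--     residues = [r for n in range(3, N_max + 1, 2)
--                   for r in _counted(n, set(), ORBIT_LIMIT - 1, mod)]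
--     return Counter(residues), len(residues)
-- ===== Notes on version B (the rewrite author's own statement) =====
-- stated objective: idiomatic
-- what changed: B replaces A's imperative two-phase design (materialise each orbit list with a while-loop and seen-set, slice off the last element, mutate a Counter and a running total inside nested for-loops) by a recursive producer of the counted residues per seed, a single flat comprehension over all seeds, one Counter(...) construction and total = len(residues). Pre_ excludes k < 0, where Python's 2 ** k is a float and A returns float residue keys, not values of the declared int type.
-- outside the precondition, e.g. on compute_measure_no_sink(5, -1): A returns ({0.0: 3}, 3), B raises ValueError
import Mathlib
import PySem

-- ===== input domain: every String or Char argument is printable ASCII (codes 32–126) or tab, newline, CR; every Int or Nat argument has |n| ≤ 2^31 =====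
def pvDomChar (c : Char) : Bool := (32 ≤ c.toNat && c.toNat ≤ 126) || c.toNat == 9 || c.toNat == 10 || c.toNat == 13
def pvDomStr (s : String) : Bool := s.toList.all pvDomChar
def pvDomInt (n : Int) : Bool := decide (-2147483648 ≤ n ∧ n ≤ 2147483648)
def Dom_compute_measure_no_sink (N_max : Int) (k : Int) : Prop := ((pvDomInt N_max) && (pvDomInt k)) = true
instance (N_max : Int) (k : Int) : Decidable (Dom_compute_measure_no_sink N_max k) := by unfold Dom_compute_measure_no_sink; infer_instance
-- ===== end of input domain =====

-- B recasts A's nested imperative loops (orbit list + slice + mutated Counter/total) as a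
-- recursive per-seed producer of counted residues, one flat comprehension, one Counter(...)
-- call and total = len; objective: idiomatic.

-- ===== PORT A =====

-- 'while x % 2 == 0: x //= 2' (the 'x ≠ 0' guard only makes the recursion total;
-- Python diverges at x = 0, which no admitted call reaches)
def syracuseHalve (x : Int) : Int :=
  if h : x ≠ 0 ∧ PySem.Int.mod x 2 = 0 then syracuseHalve (PySem.Int.floordiv x 2) else x
  termination_by x.natAbs
  decreasing_by
    have h2 : PySem.Int.floordiv x 2 = x / 2 := PySem.Int.floordiv_eq_ediv_of_pos (by omega)
    have h3 : PySem.Int.mod x 2 = x % 2 := PySem.Int.mod_eq_emod_of_pos (by omega)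
    rw [h2]
    rw [h3] at h
    omega

def syracuse (n : Int) : Int := syracuseHalve (3 * n + 1)

-- the 'for _ in range(max_steps)' loop of collatz_orbit_odd
def orbitLoop (fuel : Nat) (x : Int) (seen : PySem.Set Int) (steps : List Int) : List Int :=
  match fuel with
  | 0 => steps
  | f + 1 =>
    if x = 1 then steps ++ [x]
    else if PySem.Set.contains seen x then steps ++ [x]
    else orbitLoop f (syracuse x) (PySem.Set.add seen x) (steps ++ [x])

def collatz_orbit_odd (n : Int) (max_steps : Int) : List Int :=
  let x := if PySem.Int.mod n 2 = 0 then syracuseHalve n else n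
  orbitLoop max_steps.toNat x PySem.Set.empty []

-- 'freq[x % mod] += 1; total += 1' on the state (freq, total)
def aUpd (m : Int) (st : PySem.Dict Int Int × Int) (x : Int) : PySem.Dict Int Int × Int :=
  (st.1.modify (PySem.Int.mod x m) 0 (· + 1), st.2 + 1)

-- the body of A's outer 'for n0 in range(3, N_max + 1, 2)' loop
def aBody (m : Int) (st : PySem.Dict Int Int × Int) (n0 : Int) : PySem.Dict Int Int × Int :=
  (PySem.List.slice (collatz_orbit_odd n0 10000) none (some (-1))).foldl (aUpd m) st

def compute_measure_no_sink (N_max : Int) (k : Int) : (List (Int × Int)) × Int :=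
  let m : Int := (2 : Int) ^ k.toNat   -- 2 ** k; Pre_ keeps k ≥ 0 (Python gives a float for k < 0)
  let res := (PySem.List.pyRange 3 (N_max + 1) 2).foldl (aBody m) (PySem.Dict.empty, 0)
  (res.1.items, res.2)

-- ===== PORT B =====

-- Source B's 'while y % 2 == 0: y //= 2' inside _counted (same totality guard as A's)
def bHalve (y : Int) : Int :=
  if h : y ≠ 0 ∧ PySem.Int.mod y 2 = 0 then bHalve (PySem.Int.floordiv y 2) else y
  termination_by y.natAbs
  decreasing_by
    have h2 : PySem.Int.floordiv y 2 = y / 2 := PySem.Int.floordiv_eq_ediv_of_pos (by omega)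
    have h3 : PySem.Int.mod y 2 = y % 2 := PySem.Int.mod_eq_emod_of_pos (by omega)
    rw [h2]
    rw [h3] at h
    omega

-- Source B's recursive _counted(x, trail, budget, mod)
def bCounted (x : Int) (trail : PySem.Set Int) (budget : Nat) (m : Int) : List Int :=
  match budget with
  | 0 => []
  | b + 1 =>
    if x = 1 ∨ PySem.Set.contains trail x then []
    else PySem.Int.mod x m :: bCounted (bHalve (3 * x + 1)) (PySem.Set.add trail x) b m

def compute_measure_no_sink_alt (N_max : Int) (k : Int) : (List (Int × Int)) × Int :=
  let m : Int := (2 : Int) ^ k.toNat   -- 1 << k; Pre_ keeps k ≥ 0 (ValueError for k < 0)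
  let residues := (PySem.List.pyRange 3 (N_max + 1) 2).flatMap
    (fun n => bCounted n PySem.Set.empty (10000 - 1) m)
  ((PySem.Dict.counter residues).items, residues.length)

-- ===== PRECONDITION & SPEC =====
-- Pre_ excludes k < 0, where Python's 2 ** k is a float and A returns float residue keys
-- (not a value of the declared int type); B raises ValueError there.
def Pre_compute_measure_no_sink (N_max : Int) (k : Int) : Prop := 0 ≤ k
instance (N_max : Int) (k : Int) : Decidable (Pre_compute_measure_no_sink N_max k) := by
  unfold Pre_compute_measure_no_sink; infer_instance

def pvWitness_compute_measure_no_sink : Int × Int := (9, 2)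

def Spec_compute_measure_no_sink (N_max : Int) (k : Int) (out : (List (Int × Int)) × Int) : Prop :=
  out = compute_measure_no_sink_alt N_max k
instance (N_max : Int) (k : Int) (out : (List (Int × Int)) × Int) :
    Decidable (Spec_compute_measure_no_sink N_max k out) := by
  unfold Spec_compute_measure_no_sink; infer_instance

-- ===== CLAIM (what is proved, stated in full; the proofs are below) =====
def Claim_equal_compute_measure_no_sink : Prop :=
  ∀ (N_max : Int) (k : Int), Dom_compute_measure_no_sink N_max k →
    Pre_compute_measure_no_sink N_max k →
    Spec_compute_measure_no_sink N_max k (compute_measure_no_sink N_max k)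

-- ===== LEMMAS AND PROOFS =====

lemma bHalve_eq_syracuseHalve (y : Int) : bHalve y = syracuseHalve y := by
  induction y using bHalve.induct with
  | case1 y h ih => rw [bHalve, syracuseHalve, dif_pos h, dif_pos h, ih]
  | case2 y h => rw [bHalve, syracuseHalve, dif_neg h, dif_neg h]

lemma orbitLoop_acc (fuel : Nat) :
    ∀ (x : Int) (seen : PySem.Set Int) (st : List Int),
      orbitLoop fuel x seen st = st ++ orbitLoop fuel x seen [] := by
  induction fuel with
  | zero => intro x seen st; simp [orbitLoop]
  | succ f ih =>
    intro x seen st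
    simp only [orbitLoop]
    split_ifs with h1 h2
    · simp
    · simp
    · rw [ih _ _ (st ++ [x]), ih _ _ ([] ++ [x])]
      simp

lemma orbitLoop_ne_nil (fuel : Nat) (hf : 1 ≤ fuel) (x : Int) (seen : PySem.Set Int) :
    orbitLoop fuel x seen [] ≠ [] := by
  obtain ⟨f, rfl⟩ : ∃ f, fuel = f + 1 := ⟨fuel - 1, by omega⟩
  simp only [orbitLoop]
  split_ifs with h1 h2
  · simp
  · simp
  · rw [orbitLoop_acc]
    simp

-- one seed: A's fold over orbit[:-1] is B's counted-residue list, counted into the dict,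
-- with the total advanced by its length
lemma inner_eq (m : Int) (f : Nat) :
    ∀ (x : Int) (seen : PySem.Set Int) (d : PySem.Dict Int Int) (t : Int),
      (orbitLoop (f + 1) x seen []).dropLast.foldl (aUpd m) (d, t) =
        ((bCounted x seen f m).foldl (fun d r => d.modify r 0 (· + 1)) d,
         t + (bCounted x seen f m).length) := by
  induction f with
  | zero =>
    intro x seen d t
    have : (orbitLoop 1 x seen []).dropLast = [] := by
      simp only [orbitLoop]
      split_ifs <;> simp
    rw [this]
    simp [bCounted]
  | succ f ih =>
    intro x seen d t
    by_cases hx : x = 1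
    · have h1 : orbitLoop (f + 1 + 1) x seen [] = [x] := by
        rw [orbitLoop, if_pos hx]
        rfl
      rw [h1]
      have h2 : bCounted x seen (f + 1) m = [] := by
        rw [bCounted, if_pos (Or.inl hx)]
      rw [h2]
      simp
    · by_cases hs : PySem.Set.contains seen x = true
      · have h1 : orbitLoop (f + 1 + 1) x seen [] = [x] := by
          rw [orbitLoop, if_neg hx, if_pos hs]
          rfl
        rw [h1]
        have h2 : bCounted x seen (f + 1) m = [] := by
          rw [bCounted, if_pos (Or.inr hs)]
        rw [h2]
        simp
      · have horb : orbitLoop (f + 1 + 1) x seen [] =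
            x :: orbitLoop (f + 1) (syracuse x) (PySem.Set.add seen x) [] := by
          rw [orbitLoop, if_neg hx, if_neg hs, orbitLoop_acc]
          rfl
        rw [horb, List.dropLast_cons_of_ne_nil (orbitLoop_ne_nil (f + 1) (by omega) _ _),
          List.foldl_cons]
        have hupd : aUpd m (d, t) x =
            (d.modify (PySem.Int.mod x m) 0 (· + 1), t + 1) := rfl
        rw [hupd, ih]
        have hb : bCounted x seen (f + 1) m =
            PySem.Int.mod x m ::
              bCounted (bHalve (3 * x + 1)) (PySem.Set.add seen x) f m := by
          rw [bCounted, if_neg (fun hc => hc.elim hx hs)]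
        rw [hb, bHalve_eq_syracuseHalve,
          show syracuseHalve (3 * x + 1) = syracuse x from rfl]
        simp only [List.foldl_cons, List.length_cons, Prod.mk.injEq]
        exact ⟨by trivial, by push_cast; omega⟩

lemma pyRange2_nil (a b : Int) (h : b ≤ a) : PySem.List.pyRange a b 2 = [] := by
  rw [PySem.List.pyRange_of_pos _ _ (by omega)]
  rw [if_neg (by omega)]
  simp

lemma pyRange2_cons (a b : Int) (h : a < b) :
    PySem.List.pyRange a b 2 = a :: PySem.List.pyRange (a + 2) b 2 := by
  rw [PySem.List.pyRange_of_pos _ _ (show (0:Int) < 2 by omega),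
      PySem.List.pyRange_of_pos _ _ (show (0:Int) < 2 by omega)]
  rw [if_pos h]
  by_cases h2 : a + 2 < b
  · rw [if_pos h2]
    have hcnt : ((b - a + 2 - 1) / 2).toNat = ((b - (a + 2) + 2 - 1) / 2).toNat + 1 := by omega
    rw [hcnt, List.range_succ_eq_map]
    simp only [List.map_cons, List.map_map]
    congr 1
    · omega
    · apply List.map_congr_left
      intro i _
      simp only [Function.comp_apply]
      push_cast
      ring
  · rw [if_neg h2]
    have hcnt : ((b - a + 2 - 1) / 2).toNat = 1 := by omega
    rw [hcnt]
    simp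

lemma mod2_one_succ2 (n : Int) (h : PySem.Int.mod n 2 = 1) : PySem.Int.mod (n + 2) 2 = 1 := by
  have e1 : PySem.Int.mod n 2 = n % 2 := PySem.Int.mod_eq_emod_of_pos (by omega)
  have e2 : PySem.Int.mod (n + 2) 2 = (n + 2) % 2 := PySem.Int.mod_eq_emod_of_pos (by omega)
  omega

-- the whole range: A's outer fold is the counting fold over B's flattened residue stream
lemma outer_eq (N_max m : Int) :
    ∀ (c : Nat) (n0 : Int) (d : PySem.Dict Int Int) (t : Int),
      (N_max + 1 - n0).toNat ≤ c → PySem.Int.mod n0 2 = 1 →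
      (PySem.List.pyRange n0 (N_max + 1) 2).foldl (aBody m) (d, t) =
        (((PySem.List.pyRange n0 (N_max + 1) 2).flatMap
            (fun n => bCounted n PySem.Set.empty (10000 - 1) m)).foldl
              (fun d r => d.modify r 0 (· + 1)) d,
         t + ((PySem.List.pyRange n0 (N_max + 1) 2).flatMap
            (fun n => bCounted n PySem.Set.empty (10000 - 1) m)).length) := by
  intro c
  induction c with
  | zero =>
    intro n0 d t hc hodd
    rw [pyRange2_nil _ _ (by omega)]
    simp
  | succ c ih =>
    intro n0 d t hc hodd
    by_cases hle : n0 ≤ N_max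
    · rw [pyRange2_cons _ _ (by omega), List.foldl_cons]
      have hbody : aBody m (d, t) n0 =
          ((bCounted n0 PySem.Set.empty (10000 - 1) m).foldl
              (fun d r => d.modify r 0 (· + 1)) d,
           t + (bCounted n0 PySem.Set.empty (10000 - 1) m).length) := by
        unfold aBody collatz_orbit_odd
        rw [PySem.List.slice_to_neg_one]
        simp only [if_neg (by rw [hodd]; omega : ¬ PySem.Int.mod n0 2 = 0)]
        exact inner_eq m (10000 - 1) n0 PySem.Set.empty d t
      rw [hbody, ih (n0 + 2) _ _ (by omega) (mod2_one_succ2 n0 hodd)]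
      simp only [List.flatMap_cons, List.foldl_append, List.length_append, Prod.mk.injEq]
      exact ⟨by trivial, by push_cast; omega⟩
    · rw [pyRange2_nil _ _ (by omega)]
      simp

-- ===== VERDICT (by name: the statement is the Claim_ definition above) =====
theorem compute_measure_no_sink_spec : Claim_equal_compute_measure_no_sink := by
  intro N_max k _ _
  unfold Spec_compute_measure_no_sink
  simp only [compute_measure_no_sink, compute_measure_no_sink_alt]
  rw [outer_eq N_max ((2 : Int) ^ k.toNat) (N_max + 1 - 3).toNat 3 PySem.Dict.empty 0
    (le_refl _) (by decide)]
  rw [PySem.Dict.counter_eq_foldl]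
  simp
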